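-- pv_equiv track=rewrite | github.com/wlad031/dotfiles | television/scripts/raycast_source.py | parse_desktop_entry
-- ===== SOURCE A (Python) =====
-- def parse_desktop_entry(text: str) -> dict[str, str]:
--     in_entry = False
--     out: dict[str, str] = {}
--     for raw in text.splitlines():
--         line = raw.strip()
--         if not line or line.startswith("#"):
--             continue
--         if line.startswith("[") and line.endswith("]"):
--             in_entry = line == "[Desktop Entry]"
--             continue
--         if not in_entry:
--             continue
--         if "=" not in line:
--             continue
--         k, v = line.split("=", 1)
--         out[k.strip()] = v.strip()
--     return out
-- ===== SOURCE B (Python) =====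
-- def parse_desktop_entry(text: str) -> dict[str, str]:
--     # Group stripped lines under their section headers, then read off the
--     # key=value pairs collected for [Desktop Entry].
--     sections: dict[str, list[str]] = {}
--     current = None
--     for raw in text.splitlines():
--         line = raw.strip()
--         if not line or line.startswith("#"):
--             continue
--         if line.startswith("[") and line.endswith("]"):
--             sections.setdefault(line, [])
--             current = line
--         elif current is not None:
--             sections[current].append(line)
--     out: dict[str, str] = {}
--     for line in sections.get("[Desktop Entry]", []):
--         if "=" in line:
--             k, v = line.split("=", 1)
--             out[k.strip()] = v.strip()
--     return out
-- ===== Notes on version B (the rewrite author's own statement) =====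
-- stated objective: alternative
-- what changed: Replaces A's single pass with an in_entry boolean flag by a two-phase design: first group stripped lines into a header-to-lines dict, then parse key=value pairs only from the [Desktop Entry] bucket.
import Mathlib
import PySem

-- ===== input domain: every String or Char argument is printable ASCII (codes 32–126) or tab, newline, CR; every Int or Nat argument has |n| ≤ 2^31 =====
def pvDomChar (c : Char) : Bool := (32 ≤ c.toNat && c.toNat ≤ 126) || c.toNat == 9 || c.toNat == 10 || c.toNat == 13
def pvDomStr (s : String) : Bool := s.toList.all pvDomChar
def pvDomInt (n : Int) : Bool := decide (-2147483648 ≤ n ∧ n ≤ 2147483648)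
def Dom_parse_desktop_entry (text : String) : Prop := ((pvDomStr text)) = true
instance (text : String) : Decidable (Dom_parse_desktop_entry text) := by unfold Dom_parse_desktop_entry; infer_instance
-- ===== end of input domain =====

-- B replaces A's one-pass boolean-flag scan by a two-phase design: group stripped
-- lines into a header→lines dict, then parse key=value pairs from the
-- [Desktop Entry] bucket (objective: alternative).

-- ===== PORT A =====
-- one step of A's loop over the raw lines; state = (in_entry, out)
def pvAStep (st : Bool × PySem.Dict String String) (raw : String) :
    Bool × PySem.Dict String String :=
  -- line = raw.strip(): written out at each use (same value)
  if PySem.Str.strip raw == "" || PySem.Str.startswith (PySem.Str.strip raw) "#" then st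
  else if PySem.Str.startswith (PySem.Str.strip raw) "[" &&
      PySem.Str.endswith (PySem.Str.strip raw) "]" then
    (PySem.Str.strip raw == "[Desktop Entry]", st.2)
  else if !st.1 then st
  else if !(PySem.Str.isIn "=" (PySem.Str.strip raw)) then st
  else
    match PySem.Str.splitMax? (PySem.Str.strip raw) "=" 1 with
    | some (k :: v :: _) => (st.1, st.2.insert (PySem.Str.strip k) (PySem.Str.strip v))
    | _ => st   -- unreachable: "=" ∈ line, sep ≠ "" ⇒ split yields exactly two parts

def parse_desktop_entry (text : String) : List (String × String) :=
  (((PySem.Str.splitlines text).foldl pvAStep (false, PySem.Dict.empty)).2).items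

-- ===== PORT B =====
-- one step of B's grouping loop; state = (sections, current)
def pvBStep (st : PySem.Dict String (List String) × Option String) (raw : String) :
    PySem.Dict String (List String) × Option String :=
  if PySem.Str.strip raw == "" || PySem.Str.startswith (PySem.Str.strip raw) "#" then st
  else if PySem.Str.startswith (PySem.Str.strip raw) "[" &&
      PySem.Str.endswith (PySem.Str.strip raw) "]" then
    (st.1.setdefault (PySem.Str.strip raw) [], some (PySem.Str.strip raw))
  else
    match st.2 with
    | some h => (st.1.modify h [] (· ++ [PySem.Str.strip raw]), st.2)
    | none => st

-- body of B's second loop: assign one "="-line into out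
def pvAssign (d : PySem.Dict String String) (line : String) : PySem.Dict String String :=
  if PySem.Str.isIn "=" line then
    match PySem.Str.splitMax? line "=" 1 with
    | some (k :: v :: _) => d.insert (PySem.Str.strip k) (PySem.Str.strip v)
    | _ => d
  else d

def parse_desktop_entry_alt (text : String) : List (String × String) :=
  (((((PySem.Str.splitlines text).foldl pvBStep (PySem.Dict.empty, none)).1).getD
      "[Desktop Entry]" []).foldl pvAssign PySem.Dict.empty).items

-- ===== PRECONDITION & SPEC =====
def Spec_parse_desktop_entry (text : String) (out : List (String × String)) : Prop := out = parse_desktop_entry_alt text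
instance (text : String) (out : List (String × String)) : Decidable (Spec_parse_desktop_entry text out) := by unfold Spec_parse_desktop_entry; infer_instance

-- ===== CLAIM (what is proved, stated in full; the proofs are below) =====
def Claim_equal_parse_desktop_entry : Prop := ∀ (text : String), Dom_parse_desktop_entry text → Spec_parse_desktop_entry text (parse_desktop_entry text)

-- ===== LEMMAS AND PROOFS =====

def pvIsHeader (l : String) : Bool :=
  PySem.Str.startswith l "[" && PySem.Str.endswith l "]"

def pvKept (s : String) : Bool := !(s == "") && !(PySem.Str.startswith s "#")

-- A's step on a kept (stripped, non-blank, non-#) line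
def pvCStep (st : Bool × PySem.Dict String String) (line : String) :
    Bool × PySem.Dict String String :=
  if pvIsHeader line then (line == "[Desktop Entry]", st.2)
  else if !st.1 then st
  else (st.1, pvAssign st.2 line)

-- B's step on a kept stripped line
def pvDStep (st : PySem.Dict String (List String) × Option String) (line : String) :
    PySem.Dict String (List String) × Option String :=
  if pvIsHeader line then (st.1.setdefault line [], some line)
  else
    match st.2 with
    | some h => (st.1.modify h [] (· ++ [line]), st.2)
    | none => st

-- the lines A actually assigns from, given the current flag
def pvSelected : Bool → List String → List String
  | _, [] => []
  | b, l :: ls =>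
      if pvIsHeader l then pvSelected (l == "[Desktop Entry]") ls
      else if b then l :: pvSelected b ls else pvSelected b ls

theorem pvAStep_eq (st : Bool × PySem.Dict String String) (raw : String) :
    pvAStep st raw =
      if pvKept (PySem.Str.strip raw) then pvCStep st (PySem.Str.strip raw) else st := by
  obtain ⟨b, d⟩ := st
  unfold pvAStep pvKept pvCStep pvIsHeader pvAssign
  generalize PySem.Str.strip raw = line
  generalize (line == "") = p
  generalize (PySem.Str.startswith line "#") = q
  generalize (PySem.Str.startswith line "[" && PySem.Str.endswith line "]") = hd
  generalize (line == "[Desktop Entry]") = c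
  generalize (PySem.Str.isIn "=" line) = e
  generalize PySem.Str.splitMax? line "=" 1 = o
  cases p <;> cases q <;> cases hd <;> cases b <;> cases e <;> first
    | rfl
    | rcases o with _ | ⟨_ | ⟨k, _ | ⟨v, rest⟩⟩⟩ <;> rfl

theorem pvBStep_eq (st : PySem.Dict String (List String) × Option String) (raw : String) :
    pvBStep st raw =
      if pvKept (PySem.Str.strip raw) then pvDStep st (PySem.Str.strip raw) else st := by
  obtain ⟨d, cur⟩ := st
  unfold pvBStep pvKept pvDStep pvIsHeader
  generalize PySem.Str.strip raw = line
  generalize (line == "") = p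
  generalize (PySem.Str.startswith line "#") = q
  generalize (PySem.Str.startswith line "[" && PySem.Str.endswith line "]") = hd
  cases p <;> cases q <;> cases hd <;> cases cur <;> rfl

theorem pvFoldA_eq (raws : List String) (st : Bool × PySem.Dict String String) :
    raws.foldl pvAStep st = ((raws.map PySem.Str.strip).filter pvKept).foldl pvCStep st := by
  induction raws generalizing st with
  | nil => rfl
  | cons r rs ih =>
      simp only [List.foldl_cons, List.map_cons, List.filter_cons, pvAStep_eq]
      by_cases h : pvKept (PySem.Str.strip r) <;> simp [h, ih]

theorem pvFoldB_eq (raws : List String)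
    (st : PySem.Dict String (List String) × Option String) :
    raws.foldl pvBStep st = ((raws.map PySem.Str.strip).filter pvKept).foldl pvDStep st := by
  induction raws generalizing st with
  | nil => rfl
  | cons r rs ih =>
      simp only [List.foldl_cons, List.map_cons, List.filter_cons, pvBStep_eq]
      by_cases h : pvKept (PySem.Str.strip r) <;> simp [h, ih]

theorem pvFoldC_eq (lines : List String) (b : Bool) (d : PySem.Dict String String) :
    (lines.foldl pvCStep (b, d)).2 = (pvSelected b lines).foldl pvAssign d := by
  induction lines generalizing b d with
  | nil => rfl
  | cons l ls ih =>
      simp only [List.foldl_cons, pvCStep, pvSelected]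
      by_cases h : pvIsHeader l = true
      · simp [h, ih]
      · cases b <;> simp [h, ih]

-- flag A holds ↔ the current header in B is "[Desktop Entry]"
def pvFlag : Option String → Bool
  | some h => h == "[Desktop Entry]"
  | none => false

-- getD on a key is unchanged by setdefault _ []
theorem pvGetD_setdefault_nil (d : PySem.Dict String (List String)) (k k' : String) :
    (d.setdefault k []).getD k' [] = d.getD k' [] := by
  by_cases hc : d.contains k = true
  · rw [PySem.Dict.setdefault_of_contains d [] hc]
  · rw [PySem.Dict.setdefault_of_not_contains d [] (by simpa using hc), PySem.Dict.getD_insert]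
    by_cases he : k' = k
    · subst he; simp [PySem.Dict.getD_of_not_contains d [] (by simpa using hc)]
    · simp [he]

-- invariant of B's grouping loop: the [Desktop Entry] bucket collects exactly
-- the lines A's flag selects
theorem pvFoldD_DE (lines : List String)
    (d : PySem.Dict String (List String)) (cur : Option String) :
    ((lines.foldl pvDStep (d, cur)).1).getD "[Desktop Entry]" [] =
      d.getD "[Desktop Entry]" [] ++ pvSelected (pvFlag cur) lines := by
  induction lines generalizing d cur with
  | nil => simp [pvSelected]
  | cons l ls ih =>
      simp only [List.foldl_cons, pvDStep, pvSelected]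
      by_cases h : pvIsHeader l = true
      · simp only [h, if_true, ih, pvGetD_setdefault_nil, pvFlag]
      · rcases cur with _ | h'
        · simp [h, pvFlag, ih]
        · simp only [h, if_false, Bool.false_eq_true, ih, pvFlag, PySem.Dict.getD_modify]
          by_cases he : h' = "[Desktop Entry]"
          · subst he; simp
          · simp [he, Ne.symm he]

-- ===== VERDICT (by name: the statement is the Claim_ definition above) =====
theorem parse_desktop_entry_spec : Claim_equal_parse_desktop_entry := by
  intro text _
  unfold Spec_parse_desktop_entry parse_desktop_entry parse_desktop_entry_alt
  rw [pvFoldA_eq, pvFoldB_eq, pvFoldC_eq, pvFoldD_DE]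
  rfl
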